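-- pv_equiv track=rewrite | github.com/google/oss-fuzz-gen | memory_helper/errors.py | _limit_include_stack
-- ===== SOURCE A (Python) =====
-- from typing import Any, Dict, List, Optional
--
-- def _limit_include_stack(lines: List[str], max_keep: int = 4) -> List[str]:
--   """ limit include stack """
--   out: List[str] = []
--   buf: List[str] = []
--
--   def flush():
--     if buf:
--       out.extend(buf[:max_keep])
--       buf.clear()
--
--   for ln in lines:
--     if ln.startswith("In file included from"):
--       buf.append(ln)
--     else:
--       flush()
--       out.append(ln)
--   flush()
--   return out
-- ===== SOURCE B (Python) =====
-- from typing import Any, Dict, List, Optional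
--
-- def _limit_include_stack(lines: List[str], max_keep: int = 4) -> List[str]:
--   """ limit include stack: group consecutive runs by whether the line is an
--   include-stack line, truncate each include run to max_keep. """
--   out: List[str] = []
--   i, n = 0, len(lines)
--   while i < n:
--     is_inc = lines[i].startswith("In file included from")
--     j = i
--     while j < n and lines[j].startswith("In file included from") == is_inc:
--       j += 1
--     g = lines[i:j]
--     out.extend(g[:max_keep] if is_inc else g)
--     i = j
--   return out
-- ===== Notes on version B (the rewrite author's own statement) =====
-- stated objective: alternative
-- what changed: Replaces the element-wise buffer/flush state machine with explicit consecutive-run grouping: scan maximal runs of same-kind lines and emit each run at once, truncating include runs with one slice.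
import Mathlib
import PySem

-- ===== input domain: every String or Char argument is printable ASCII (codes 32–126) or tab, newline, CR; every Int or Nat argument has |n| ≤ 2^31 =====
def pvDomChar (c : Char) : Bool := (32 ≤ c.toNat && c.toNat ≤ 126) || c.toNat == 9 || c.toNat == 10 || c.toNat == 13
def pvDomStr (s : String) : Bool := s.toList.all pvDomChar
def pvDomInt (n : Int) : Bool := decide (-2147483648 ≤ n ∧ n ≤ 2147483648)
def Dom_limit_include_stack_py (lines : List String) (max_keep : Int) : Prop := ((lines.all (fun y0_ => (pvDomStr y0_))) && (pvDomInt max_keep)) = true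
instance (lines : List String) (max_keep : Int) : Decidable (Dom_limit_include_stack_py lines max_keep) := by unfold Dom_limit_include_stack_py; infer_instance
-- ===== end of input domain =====

-- B replaces A's element-wise buffer/flush state machine by explicit grouping of
-- maximal consecutive same-kind runs, truncating each include run with one slice.

-- ===== PORT A =====
def pvInc (ln : String) : Bool := PySem.Str.startswith ln "In file included from"

-- flush(): if buf: out.extend(buf[:max_keep]); buf.clear()
def pvFlushA (max_keep : Int) (out buf : List String) : List String × List String :=
  if buf ≠ [] then (out ++ PySem.List.slice buf none (some max_keep), []) else (out, buf)

def pvStepA (max_keep : Int) (st : List String × List String) (ln : String) : List String × List String :=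
  if pvInc ln then (st.1, st.2 ++ [ln])
  else
    let st' := pvFlushA max_keep st.1 st.2
    (st'.1 ++ [ln], st'.2)

def limit_include_stack_py (lines : List String) (max_keep : Int) : List String :=
  let st := lines.foldl (pvStepA max_keep) ([], [])
  (pvFlushA max_keep st.1 st.2).1

-- ===== PORT B =====
def limit_include_stack_py_alt (lines : List String) (max_keep : Int) : List String :=
  match lines with
  | [] => []
  | l :: ls =>
    (if pvInc l then
        PySem.List.slice (l :: ls.takeWhile (fun x => pvInc x == pvInc l)) none (some max_keep)
      else l :: ls.takeWhile (fun x => pvInc x == pvInc l)) ++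
    limit_include_stack_py_alt (ls.dropWhile (fun x => pvInc x == pvInc l)) max_keep
termination_by lines.length
decreasing_by
  simp only [List.length_cons]
  exact Nat.lt_succ_of_le (List.length_dropWhile_le _ _)

-- ===== PRECONDITION & SPEC =====
def Spec_limit_include_stack_py (lines : List String) (max_keep : Int) (out : List String) : Prop := out = limit_include_stack_py_alt lines max_keep
instance (lines : List String) (max_keep : Int) (out : List String) : Decidable (Spec_limit_include_stack_py lines max_keep out) := by unfold Spec_limit_include_stack_py; infer_instance

-- ===== CLAIM (what is proved, stated in full; the proofs are below) =====
def Claim_equal_limit_include_stack_py : Prop := ∀ (lines : List String) (max_keep : Int), Dom_limit_include_stack_py lines max_keep → Spec_limit_include_stack_py lines max_keep (limit_include_stack_py lines max_keep)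

-- ===== LEMMAS AND PROOFS =====

-- `buf[:max_keep]` if buf is nonempty, else []
def pvE (mk : Int) (buf : List String) : List String :=
  if buf ≠ [] then PySem.List.slice buf none (some mk) else []

-- out-free rendering of A's loop-plus-final-flush from state (out, buf)
def pvRunA (mk : Int) (buf : List String) : List String → List String
  | [] => pvE mk buf
  | l :: ls =>
    if pvInc l then pvRunA mk (buf ++ [l]) ls
    else pvE mk buf ++ l :: pvRunA mk [] ls

theorem pvFlushA_eq (mk : Int) (out buf : List String) :
    pvFlushA mk out buf = (out ++ pvE mk buf, if buf ≠ [] then [] else buf) := by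
  unfold pvFlushA pvE
  split <;> simp

theorem foldl_eq_runA (mk : Int) (lines : List String) :
    ∀ out buf, (pvFlushA mk (List.foldl (pvStepA mk) (out, buf) lines).1
        (List.foldl (pvStepA mk) (out, buf) lines).2).1 = out ++ pvRunA mk buf lines := by
  induction lines with
  | nil =>
    intro out buf
    simp [pvRunA, pvFlushA_eq]
  | cons l ls ih =>
    intro out buf
    rw [List.foldl_cons]
    by_cases h : pvInc l = true
    · rw [show pvStepA mk (out, buf) l = (out, buf ++ [l]) by simp [pvStepA, h]]
      rw [ih out (buf ++ [l])]
      simp [pvRunA, h]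
    · rw [show pvStepA mk (out, buf) l = (out ++ pvE mk buf ++ [l], []) by
        cases buf <;> simp [pvStepA, h, pvFlushA_eq, pvE]]
      rw [ih (out ++ pvE mk buf ++ [l]) []]
      simp [pvRunA, h]

theorem portA_eq_runA (mk : Int) (lines : List String) :
    limit_include_stack_py lines mk = pvRunA mk [] lines := by
  unfold limit_include_stack_py
  simpa using foldl_eq_runA mk lines [] []

theorem runA_inc_append (mk : Int) (g : List String) (hg : ∀ x ∈ g, pvInc x = true) :
    ∀ buf rest, pvRunA mk buf (g ++ rest) = pvRunA mk (buf ++ g) rest := by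
  induction g with
  | nil => intro buf rest; simp
  | cons a as ih =>
    intro buf rest
    have ha : pvInc a = true := hg a (by simp)
    simp only [List.cons_append, pvRunA, ha, if_pos]
    rw [ih (fun x hx => hg x (by simp [hx])) (buf ++ [a]) rest]
    simp

theorem pvInc_beq_eta (l : String) (hl : pvInc l = true) :
    (fun x => pvInc x == pvInc l) = (fun x => pvInc x) := by
  funext x; rw [hl]; cases pvInc x <;> rfl

theorem alt_notinc (mk : Int) (l : String) (ls : List String) (h : pvInc l = false) :
    limit_include_stack_py_alt (l :: ls) mk = l :: limit_include_stack_py_alt ls mk := by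
  cases ls with
  | nil => simp [limit_include_stack_py_alt, h]
  | cons m ms =>
    by_cases hm : pvInc m = true
    · rw [limit_include_stack_py_alt]
      simp [h, hm]
    · have hm' : pvInc m = false := by simpa using hm
      rw [limit_include_stack_py_alt, limit_include_stack_py_alt]
      simp [h, hm']

theorem runA_eq_alt (mk : Int) : ∀ (n : ℕ) (lines : List String), lines.length ≤ n →
    pvRunA mk [] lines = limit_include_stack_py_alt lines mk := by
  intro n
  induction n with
  | zero =>
    intro lines h
    have : lines = [] := List.eq_nil_of_length_eq_zero (Nat.le_zero.mp h)
    subst this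
    simp [pvRunA, pvE, limit_include_stack_py_alt]
  | succ n ih =>
    intro lines h
    cases lines with
    | nil => simp [pvRunA, pvE, limit_include_stack_py_alt]
    | cons l ls =>
      simp only [List.length_cons, Nat.succ_le_succ_iff] at h
      by_cases hl : pvInc l = true
      · -- include run: consume l :: takeWhile pvInc ls, then the rest
        have hrun : pvRunA mk [] (l :: ls)
            = pvRunA mk (l :: ls.takeWhile (fun x => pvInc x))
                (ls.dropWhile (fun x => pvInc x)) := by
          conv_lhs => rw [show ls = ls.takeWhile (fun x => pvInc x) ++ ls.dropWhile (fun x => pvInc x) from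
            List.takeWhile_append_dropWhile.symm]
          simp only [pvRunA, hl, if_pos, List.nil_append]
          rw [runA_inc_append mk (ls.takeWhile (fun x => pvInc x))
            (fun x hx => List.mem_takeWhile_imp hx) [l] (ls.dropWhile (fun x => pvInc x))]
          simp
        rw [limit_include_stack_py_alt, pvInc_beq_eta l hl, if_pos hl, hrun]
        cases hdw : List.dropWhile (fun x => pvInc x) ls with
        | nil => simp [pvRunA, pvE, limit_include_stack_py_alt]
        | cons r rs =>
          have hne : List.dropWhile (fun x => pvInc x) ls ≠ [] := by simp [hdw]
          have hr : pvInc r = false := by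
            have := List.head_dropWhile_not (fun x => pvInc x) hne
            simpa [hdw] using this
          have hlen : rs.length + 1 ≤ n := by
            have := List.length_dropWhile_le (fun x => pvInc x) ls
            rw [hdw] at this
            simp at this
            omega
          rw [alt_notinc mk r rs hr]
          simp only [pvRunA, hr, Bool.false_eq_true, if_neg, not_false_eq_true, pvE]
          rw [ih rs (by omega)]
          simp
      · -- non-include head: emit l, continue
        have hl' : pvInc l = false := by simpa using hl
        rw [alt_notinc mk l ls hl']
        simp only [pvRunA, hl', Bool.false_eq_true, if_neg, not_false_eq_true, pvE]
        rw [ih ls h]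
        simp

-- ===== VERDICT (by name: the statement is the Claim_ definition above) =====
theorem limit_include_stack_py_spec : Claim_equal_limit_include_stack_py := by
  intro lines mk _
  unfold Spec_limit_include_stack_py
  rw [portA_eq_runA]
  exact runA_eq_alt mk lines.length lines le_rfl
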